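-- pv_equiv track=rewrite | github.com/networkx/networkx | networkx/generators/trees.py | _num_rooted_trees
-- ===== SOURCE A (Python) =====
-- def _num_rooted_trees(n, cache_trees):
--     """
--     Returns the number of unlabeled rooted trees with `n` nodes.
--     See also https://oeis.org/A000081.
--
--     Parameters
--     ----------
--     n : int
--         The number of nodes
--     cache_trees : list of ints
--         The $i$-th element is the number of unlabeled rooted trees with $i$ nodes,
--         which is used as a cache (and is extended to length $n+1$ if needed)
--
--     Returns
--     -------
--     int
--         The number of unlabeled rooted trees with `n` nodes.
--     """
--
--     for n_i in range(len(cache_trees), n + 1):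
--         cache_trees.append(
--             sum(
--                 [
--                     d * cache_trees[n_i - j * d] * cache_trees[d]
--                     for d in range(1, n_i)
--                     for j in range(1, (n_i - 1) // d + 1)
--                 ]
--             )
--             // (n_i - 1)
--         )
--     return cache_trees[n]
-- ===== SOURCE B (Python) =====
-- def _divisor_sum(k, cache_trees):
--     # sum of d * cache_trees[d] over the divisors d of k
--     return sum(d * cache_trees[d] for d in range(1, k + 1) if k % d == 0)
--
--
-- def _num_rooted_trees(n, cache_trees):
--     if n < len(cache_trees):
--         return cache_trees[n]
--     if not cache_trees:
--         cache_trees.append(0)  # there is no rooted tree on 0 nodes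
--     # s[k] = sum of d * cache_trees[d] over the divisors d of k; it only reads
--     # entries d <= k, all already cached when s[k] is first used (at m = k + 1)
--     s = [_divisor_sum(k, cache_trees) for k in range(len(cache_trees))]
--     for m in range(len(cache_trees), n + 1):
--         t = sum(s[k] * cache_trees[m - k] for k in range(1, m)) // (m - 1)
--         cache_trees.append(t)
--         s.append(_divisor_sum(m, cache_trees))
--     return cache_trees[n]
-- ===== Notes on version B (the rewrite author's own statement) =====
-- stated objective: alternative
-- what changed: Instead of A's per-term double sum over (divisor d, multiplicity j), B maintains an incrementally extended array s with s[k] = sum of d*cache[d] over divisors d of k, so each new term is a single convolution sum(s[k]*cache[m-k]) plus one divisor scan.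
import Mathlib
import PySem

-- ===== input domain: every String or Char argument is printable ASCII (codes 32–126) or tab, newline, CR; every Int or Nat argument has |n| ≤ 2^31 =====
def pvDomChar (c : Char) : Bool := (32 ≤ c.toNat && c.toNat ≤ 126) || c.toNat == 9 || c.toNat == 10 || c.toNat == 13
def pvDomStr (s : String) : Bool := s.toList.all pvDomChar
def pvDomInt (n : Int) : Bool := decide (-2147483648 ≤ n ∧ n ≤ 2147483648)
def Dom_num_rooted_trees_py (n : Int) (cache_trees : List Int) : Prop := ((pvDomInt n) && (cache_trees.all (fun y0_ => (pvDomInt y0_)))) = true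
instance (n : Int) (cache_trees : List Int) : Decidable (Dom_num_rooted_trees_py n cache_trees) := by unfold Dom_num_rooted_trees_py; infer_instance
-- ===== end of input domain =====

-- B replaces A's per-term (divisor, multiplicity) double sum by an incrementally extended
-- divisor-sum array, one convolution per term (alternative algorithm). Both A and B extend
-- cache_trees in place identically; the equivalence proved here is about the return value.


-- ===== PORT A =====
-- loop body of A: append sum([d*cache[n_i-j*d]*cache[d] for d in range(1,n_i) for j in range(1,(n_i-1)//d+1)]) // (n_i-1)
def astep (c : List Int) (n_i : Int) : List Int :=
  c ++ [PySem.Int.floordiv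
    (((PySem.List.pyRange 1 n_i 1).flatMap (fun d =>
        (PySem.List.pyRange 1 (PySem.Int.floordiv (n_i - 1) d + 1) 1).map (fun j =>
          d * PySem.List.pyGetD c (n_i - j * d) 0 * PySem.List.pyGetD c d 0))).sum)
    (n_i - 1)]

def num_rooted_trees_py (n : Int) (cache_trees : List Int) : Int :=
  let cache := (PySem.List.pyRange (cache_trees.length : Int) (n + 1) 1).foldl astep cache_trees
  PySem.List.pyGetD cache n 0

-- ===== PORT B =====
-- sum(d * cache_trees[d] for d in range(1, k + 1) if k % d == 0)
def divisor_sum_port (k : Int) (cache_trees : List Int) : Int :=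
  (((PySem.List.pyRange 1 (k + 1) 1).filter (fun d => PySem.Int.mod k d == 0)).map
    (fun d => d * PySem.List.pyGetD cache_trees d 0)).sum

-- loop body of B on state (cache, s)
def bstep (p : List Int × List Int) (m : Int) : List Int × List Int :=
  let t := PySem.Int.floordiv
    (((PySem.List.pyRange 1 m 1).map (fun k =>
        PySem.List.pyGetD p.2 k 0 * PySem.List.pyGetD p.1 (m - k) 0)).sum)
    (m - 1)
  (p.1 ++ [t], p.2 ++ [divisor_sum_port m (p.1 ++ [t])])

def num_rooted_trees_py_alt (n : Int) (cache_trees : List Int) : Int :=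
  if n < (cache_trees.length : Int) then PySem.List.pyGetD cache_trees n 0
  else
    let cache := if cache_trees.isEmpty then cache_trees ++ [0] else cache_trees
    let s := (PySem.List.pyRange 0 (cache.length : Int) 1).map (fun k => divisor_sum_port k cache)
    let cs := (PySem.List.pyRange (cache.length : Int) (n + 1) 1).foldl bstep (cache, s)
    PySem.List.pyGetD cs.1 n 0

-- ===== PRECONDITION & SPEC =====
-- Pre_ excludes exactly the inputs on which A raises: ZeroDivisionError when the loop
-- reaches n_i = 1 (n ≥ 1 with fewer than 2 cached values) and IndexError when n < -len.
def Pre_num_rooted_trees_py (n : Int) (cache_trees : List Int) : Prop :=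
  (1 ≤ n → 2 ≤ cache_trees.length) ∧ (n < 0 → -n ≤ (cache_trees.length : Int))
instance (n : Int) (cache_trees : List Int) : Decidable (Pre_num_rooted_trees_py n cache_trees) := by unfold Pre_num_rooted_trees_py; infer_instance

def pvWitness_num_rooted_trees_py : Int × List Int := (6, [0, 1])

def Spec_num_rooted_trees_py (n : Int) (cache_trees : List Int) (out : Int) : Prop := out = num_rooted_trees_py_alt n cache_trees
instance (n : Int) (cache_trees : List Int) (out : Int) : Decidable (Spec_num_rooted_trees_py n cache_trees out) := by unfold Spec_num_rooted_trees_py; infer_instance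

-- ===== CLAIM (what is proved, stated in full; the proofs are below) =====
def Claim_equal_num_rooted_trees_py : Prop := ∀ (n : Int) (cache_trees : List Int), Dom_num_rooted_trees_py n cache_trees → Pre_num_rooted_trees_py n cache_trees → Spec_num_rooted_trees_py n cache_trees (num_rooted_trees_py n cache_trees)

-- ===== LEMMAS AND PROOFS =====
def dsN (c : List Int) (k : Nat) : Int :=
  ∑ d ∈ (Finset.Icc 1 k).filter (· ∣ k), (d : Int) * c.getD d 0

def termN (c : List Int) (m : Nat) : Int :=
  ∑ k ∈ Finset.Icc 1 (m - 1), dsN c k * c.getD (m - k) 0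

lemma sum_range_list (n : Nat) (f : Nat → Int) :
    ((List.range n).map f).sum = ∑ i ∈ Finset.range n, f i := rfl

lemma sum_flatMap_int (l : List Int) (g : Int → List Int) :
    (l.flatMap g).sum = (l.map (fun a => (g a).sum)).sum := by
  induction l with
  | nil => rfl
  | cons a l ih => simp [List.flatMap_cons, ih]

lemma sum_filter_map_int (l : List Nat) (q : Nat → Bool) (g : Nat → Int) :
    (((l.filter q).map g)).sum = (l.map (fun j => if q j then g j else 0)).sum := by
  induction l with
  | nil => rfl
  | cons a l ih => by_cases h : q a <;> simp [h, ih]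

lemma pyGetD_append_left (c xs : List Int) (i d : Int) (h0 : 0 ≤ i) (h1 : i < (c.length : Int)) :
    PySem.List.pyGetD (c ++ xs) i d = PySem.List.pyGetD c i d := by
  have hlen : i < ((c ++ xs).length : Int) := by simp [List.length_append]; omega
  rw [PySem.List.pyGetD_eq_getElem _ _ h0 hlen, PySem.List.pyGetD_eq_getElem _ _ h0 h1]
  exact List.getElem_append_left _

lemma ds_stable (c xs : List Int) (k : Int) (_h0 : 0 ≤ k) (h1 : k < (c.length : Int)) :
    divisor_sum_port k (c ++ xs) = divisor_sum_port k c := by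
  unfold divisor_sum_port
  congr 1
  apply List.map_congr_left
  intro d hd
  have hd' := List.mem_filter.mp hd
  have := PySem.List.mem_pyRange_one.mp hd'.1
  rw [pyGetD_append_left c xs d 0 (by omega) (by omega)]
lemma ds_eq_dsN (c : List Int) (k : Nat) : divisor_sum_port (k : Int) c = dsN c k := by
  unfold divisor_sum_port dsN
  have h1 : PySem.List.pyRange 1 ((k : Int) + 1) 1 = (List.range k).map (fun j => ((1 + j : Nat) : Int)) := by
    rw [PySem.List.pyRange_one]
    have : ((k : Int) + 1 - 1).toNat = k := by omega
    rw [this]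
    apply List.map_congr_left
    intro a _; push_cast; ring
  rw [h1, List.filter_map, List.map_map, sum_filter_map_int, sum_range_list]
  rw [show Finset.Icc 1 k = Finset.Ico 1 (k+1) by rfl, Finset.sum_filter, Finset.sum_Ico_eq_sum_range]
  apply Finset.sum_congr (by norm_num)
  intro j _
  simp only [Function.comp]
  rw [PySem.List.pyGetD_natCast]
  have hdvd : (PySem.Int.mod (k : Int) ((1 + j : Nat) : Int) == 0) = true ↔ (1 + j) ∣ k := by
    rw [beq_iff_eq, PySem.Int.mod_eq_zero_iff_dvd]
    exact Int.natCast_dvd_natCast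
  by_cases h : (1 + j) ∣ k
  · rw [if_pos (hdvd.mpr h), if_pos h]
  · rw [if_neg (fun hh => h (hdvd.mp hh)), if_neg h]
lemma hyperbola (m : Nat) (G : Nat → Nat → Int) :
    ∑ d ∈ Finset.Icc 1 (m - 1), ∑ j ∈ Finset.Icc 1 ((m - 1) / d), G d (j * d)
      = ∑ k ∈ Finset.Icc 1 (m - 1), ∑ d ∈ (Finset.Icc 1 k).filter (· ∣ k), G d k := by
  rw [Finset.sum_sigma' (f := fun d j => G d (j * d)), Finset.sum_sigma' (f := fun k d => G d k)]
  refine Finset.sum_nbij' (fun x => ⟨x.2 * x.1, x.1⟩) (fun y => ⟨y.2, y.1 / y.2⟩) ?_ ?_ ?_ ?_ ?_ <;>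
    intro a ha <;>
    simp only [Finset.mem_sigma, Finset.mem_Icc, Finset.mem_filter] at ha ⊢
  · obtain ⟨⟨h1, h2⟩, h3, h4⟩ := ha
    have hd : 0 < a.1 := h1
    have hmul : a.2 * a.1 ≤ m - 1 := (Nat.le_div_iff_mul_le hd).mp h4
    refine ⟨⟨?_, hmul⟩, ⟨?_, ?_⟩, ⟨a.2, by ring⟩⟩
    · exact Nat.one_le_iff_ne_zero.mpr (by positivity)
    · exact h1
    · exact Nat.le_mul_of_pos_left _ h3
  · obtain ⟨⟨h1, h2⟩, ⟨h3, h4⟩, h5⟩ := ha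
    have hd : 0 < a.2 := h3
    refine ⟨⟨h3, le_trans h4 h2⟩, ?_, Nat.div_le_div_right h2⟩
    · rw [Nat.le_div_iff_mul_le hd, one_mul]; exact h4
  · obtain ⟨⟨h1, h2⟩, h3, h4⟩ := ha
    have hd : 0 < a.1 := h1
    exact Sigma.ext rfl (by simp [Nat.mul_div_cancel _ hd])
  · obtain ⟨⟨h1, h2⟩, ⟨h3, h4⟩, h5⟩ := ha
    exact Sigma.ext (Nat.div_mul_cancel h5) (by simp)
lemma pyRange_one_nat (q : Nat) :
    PySem.List.pyRange 1 ((q : Int) + 1) 1 = (List.range q).map (fun b => ((1 + b : Nat) : Int)) := by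
  rw [PySem.List.pyRange_one]
  have : ((q : Int) + 1 - 1).toNat = q := by omega
  rw [this]
  apply List.map_congr_left
  intro a _; push_cast; ring

lemma asum_eq_termN (c : List Int) (m : Nat) (hm : 1 ≤ m) :
    ((PySem.List.pyRange 1 (m : Int) 1).flatMap (fun d =>
        (PySem.List.pyRange 1 (PySem.Int.floordiv ((m : Int) - 1) d + 1) 1).map (fun j =>
          d * PySem.List.pyGetD c ((m : Int) - j * d) 0 * PySem.List.pyGetD c d 0))).sum
      = termN c m := by
  have hm1 : (m : Int) - 1 = ((m - 1 : Nat) : Int) := by omega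
  rw [sum_flatMap_int]
  rw [show (m : Int) = ((m - 1 : Nat) : Int) + 1 by omega, pyRange_one_nat, List.map_map,
    sum_range_list]
  have step1 : ∀ a ∈ Finset.range (m - 1),
      ((PySem.List.pyRange 1 (PySem.Int.floordiv (((m - 1 : Nat) : Int) + 1 - 1) ((1 + a : Nat) : Int) + 1) 1).map
        (fun j => ((1 + a : Nat) : Int) * PySem.List.pyGetD c (((m - 1 : Nat) : Int) + 1 - j * ((1 + a : Nat) : Int)) 0
          * PySem.List.pyGetD c ((1 + a : Nat) : Int) 0)).sum
      = ∑ b ∈ Finset.range ((m - 1) / (1 + a)),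
          ((1 + a : Nat) : Int) * c.getD (m - (1 + b) * (1 + a)) 0 * c.getD (1 + a) 0 := by
    intro a ha
    rw [show ((m - 1 : Nat) : Int) + 1 - 1 = ((m - 1 : Nat) : Int) by ring, PySem.Int.floordiv_natCast,
      pyRange_one_nat, List.map_map, sum_range_list]
    apply Finset.sum_congr rfl
    intro b hb
    have hb' := Finset.mem_range.mp hb
    have hble : (1 + b) * (1 + a) ≤ m - 1 := (Nat.le_div_iff_mul_le (by omega)).mp (by omega)
    simp only [Function.comp]
    rw [PySem.List.pyGetD_natCast c (1 + a)]
    have hidx : ((m - 1 : Nat) : Int) + 1 - ((1 + b : Nat) : Int) * ((1 + a : Nat) : Int)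
        = ((m - (1 + b) * (1 + a) : Nat) : Int) := by
      have hK : ((1 + b : Nat) : Int) * ((1 + a : Nat) : Int) = (((1 + b) * (1 + a) : Nat) : Int) := by
        push_cast; ring
      rw [hK]; omega
    rw [hidx, PySem.List.pyGetD_natCast]
  simp only [Function.comp]
  rw [Finset.sum_congr rfl step1]
  -- reindex range sums to Icc sums
  have conv1 : ∑ a ∈ Finset.range (m - 1), ∑ b ∈ Finset.range ((m - 1) / (1 + a)),
        ((1 + a : Nat) : Int) * c.getD (m - (1 + b) * (1 + a)) 0 * c.getD (1 + a) 0
      = ∑ d ∈ Finset.Icc 1 (m - 1), ∑ j ∈ Finset.Icc 1 ((m - 1) / d),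
          (d : Int) * c.getD (m - j * d) 0 * c.getD d 0 := by
    rw [show Finset.Icc 1 (m - 1) = Finset.Ico 1 (m - 1 + 1) by rfl, Finset.sum_Ico_eq_sum_range]
    apply Finset.sum_congr (by norm_num)
    intro a _
    rw [show Finset.Icc 1 ((m - 1) / (1 + a)) = Finset.Ico 1 ((m - 1) / (1 + a) + 1) by rfl,
      Finset.sum_Ico_eq_sum_range]
    apply Finset.sum_congr (by norm_num)
    intro b _
    rfl
  rw [conv1, hyperbola m (fun d k => (d : Int) * c.getD (m - k) 0 * c.getD d 0)]
  unfold termN dsN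
  apply Finset.sum_congr rfl
  intro k _
  rw [Finset.sum_mul]
  apply Finset.sum_congr rfl
  intro d _
  ring
def smap (c : List Int) : List Int :=
  (PySem.List.pyRange 0 (c.length : Int) 1).map (fun k => divisor_sum_port k c)

lemma bsum_eq_termN (c : List Int) (m : Nat) (hm : 1 ≤ m) (hc : c.length = m) :
    ((PySem.List.pyRange 1 (m : Int) 1).map (fun k =>
        PySem.List.pyGetD (smap c) k 0 * PySem.List.pyGetD c ((m : Int) - k) 0)).sum
      = termN c m := by
  rw [show (m : Int) = ((m - 1 : Nat) : Int) + 1 by omega, pyRange_one_nat, List.map_map,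
    sum_range_list]
  unfold termN
  rw [show Finset.Icc 1 (m - 1) = Finset.Ico 1 (m - 1 + 1) by rfl, Finset.sum_Ico_eq_sum_range]
  apply Finset.sum_congr (by norm_num)
  intro a ha
  have ha' := Finset.mem_range.mp ha
  simp only [Function.comp]
  have hs : PySem.List.pyGetD (smap c) ((1 + a : Nat) : Int) 0 = divisor_sum_port ((1 + a : Nat) : Int) c := by
    unfold smap
    rw [hc]
    exact PySem.List.pyGetD_map_pyRange_of_nonneg _ _ _ _ (by positivity) (by omega)
  rw [hs, ds_eq_dsN]
  have hidx : ((m - 1 : Nat) : Int) + 1 - ((1 + a : Nat) : Int) = ((m - (1 + a) : Nat) : Int) := by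
    omega
  rw [hidx, PySem.List.pyGetD_natCast]

lemma smap_snoc (c : List Int) (t : Int) :
    smap (c ++ [t]) = smap c ++ [divisor_sum_port (c.length : Int) (c ++ [t])] := by
  unfold smap
  rw [List.length_append, List.length_singleton,
    show ((c.length + 1 : Nat) : Int) = (c.length : Int) + 1 by push_cast; ring,
    PySem.List.pyRange_one_succ_right (by positivity), List.map_append, List.map_singleton]
  congr 1
  apply List.map_congr_left
  intro k hk
  have := PySem.List.mem_pyRange_one.mp hk
  exact ds_stable c [t] k (by omega) (by omega)
lemma astep_length (c : List Int) (x : Int) : (astep c x).length = c.length + 1 := by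
  unfold astep; simp

lemma bstep_eq (c : List Int) (hm : 1 ≤ c.length) :
    bstep (c, smap c) (c.length : Int)
      = (astep c (c.length : Int), smap (astep c (c.length : Int))) := by
  have hsum := (bsum_eq_termN c c.length hm rfl).trans (asum_eq_termN c c.length hm).symm
  unfold bstep astep
  dsimp only
  rw [hsum, smap_snoc]

lemma loop_eq (fuel : Nat) : ∀ (c : List Int) (b : Int), 1 ≤ c.length → b = (c.length : Int) + fuel →
    (PySem.List.pyRange (c.length : Int) b 1).foldl bstep (c, smap c)
      = ((PySem.List.pyRange (c.length : Int) b 1).foldl astep c,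
         smap ((PySem.List.pyRange (c.length : Int) b 1).foldl astep c)) := by
  induction fuel with
  | zero =>
    intro c b hc hb
    rw [PySem.List.pyRange_one_eq_nil (by omega)]
    rfl
  | succ fuel ih =>
    intro c b hc hb
    rw [PySem.List.pyRange_one_cons (by omega)]
    rw [List.foldl_cons, List.foldl_cons, bstep_eq c hc]
    have hlen : ((astep c (c.length : Int)).length : Int) = (c.length : Int) + 1 := by
      rw [astep_length]; push_cast; ring
    rw [show (c.length : Int) + 1 = ((astep c (c.length : Int)).length : Int) from hlen.symm]
    exact ih (astep c (c.length : Int)) b (by rw [astep_length]; omega) (by omega)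
-- ===== VERDICT (by name: the statement is the Claim_ definition above) =====
theorem num_rooted_trees_py_spec : Claim_equal_num_rooted_trees_py := by
  intro n c _dom pre
  obtain ⟨p1, p2⟩ := pre
  unfold Spec_num_rooted_trees_py num_rooted_trees_py num_rooted_trees_py_alt
  dsimp only
  by_cases h1 : n < (c.length : Int)
  · rw [if_pos h1, PySem.List.pyRange_one_eq_nil (by omega)]
    rfl
  · rw [if_neg h1]
    rw [not_lt] at h1
    by_cases hc : c = []
    · subst hc
      have hn : n = 0 := by
        have h0 : ((([] : List Int)).length : Int) = 0 := rfl
        rcases lt_or_ge n 1 with h | h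
        · omega
        · exact absurd (p1 h) (by simp)
      subst hn
      decide
    · have hc1 : 1 ≤ c.length := List.length_pos_iff.mpr hc
      rw [show c.isEmpty = false by simp [hc]]
      simp only [Bool.false_eq_true, if_false]
      have hloop := loop_eq (n + 1 - c.length).toNat c (n + 1) hc1 (by omega)
      rw [show (PySem.List.pyRange 0 (c.length : Int) 1).map (fun k => divisor_sum_port k c) = smap c from rfl,
        hloop]
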